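-- pv_equiv track=rewrite | github.com/agentleadengine/site | _build_insurance.py | module_nav_links
-- ===== SOURCE A (Python) =====
-- MODULES = [
--     ("index", "Start here", "Overview"),
--     ("module-01", "Why Claude for insurance marketing", "Module 1"),
--     ("module-02", "Setting up Claude", "Module 2"),
--     ("module-03", "The 10 prompt patterns", "Module 3"),
--     ("module-04", "Prospecting emails", "Module 4"),
--     ("module-05", "Social media content", "Module 5"),
--     ("module-06", "Blog posts + SEO", "Module 6"),
--     ("module-07", "Video scripts", "Module 7"),
--     ("module-08", "Direct mail", "Module 8"),
--     ("module-09", "Referral requests", "Module 9"),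
--     ("module-10", "Review responses", "Module 10"),
--     ("module-11", "Newsletter content", "Module 11"),
--     ("module-12", "Facebook + Google ads", "Module 12"),
--     ("module-13", "Client education material", "Module 13"),
--     ("module-14", "The weekly marketing system", "Module 14"),
--     ("module-15", "Compliance checklist", "Module 15"),
--     ("prompt-library", "Prompt library", "Library"),
-- ]
--
-- def module_nav_links(current_slug):
--     slugs = [s for s, _, _ in MODULES if s not in ("index", "prompt-library")]
--     if current_slug not in slugs:
--         return None, None
--     i = slugs.index(current_slug)
--     prev_slug = slugs[i - 1] if i > 0 else None
--     next_slug = slugs[i + 1] if i < len(slugs) - 1 else None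
--     prev = (next((l for s, l, _ in MODULES if s == prev_slug), None), f"{prev_slug}.html") if prev_slug else None
--     nxt = (next((l for s, l, _ in MODULES if s == next_slug), None), f"{next_slug}.html") if next_slug else None
--     return prev, nxt
-- ===== SOURCE B (Python) =====
-- MODULES = [
--     ("index", "Start here", "Overview"),
--     ("module-01", "Why Claude for insurance marketing", "Module 1"),
--     ("module-02", "Setting up Claude", "Module 2"),
--     ("module-03", "The 10 prompt patterns", "Module 3"),
--     ("module-04", "Prospecting emails", "Module 4"),
--     ("module-05", "Social media content", "Module 5"),
--     ("module-06", "Blog posts + SEO", "Module 6"),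
--     ("module-07", "Video scripts", "Module 7"),
--     ("module-08", "Direct mail", "Module 8"),
--     ("module-09", "Referral requests", "Module 9"),
--     ("module-10", "Review responses", "Module 10"),
--     ("module-11", "Newsletter content", "Module 11"),
--     ("module-12", "Facebook + Google ads", "Module 12"),
--     ("module-13", "Client education material", "Module 13"),
--     ("module-14", "The weekly marketing system", "Module 14"),
--     ("module-15", "Compliance checklist", "Module 15"),
--     ("prompt-library", "Prompt library", "Library"),
-- ]
--
--
-- def _fmt(pair):
--     return (pair[1], pair[0] + ".html")
--
--
-- _PAIRS = [(s, l) for s, l, _ in MODULES if s not in ("index", "prompt-library")]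
-- _NAV = {}
-- for _i, (_s, _l) in enumerate(_PAIRS):
--     _prev = _fmt(_PAIRS[_i - 1]) if _i > 0 else None
--     _next = _fmt(_PAIRS[_i + 1]) if _i < len(_PAIRS) - 1 else None
--     _NAV[_s] = (_prev, _next)
--
--
-- def module_nav_links(current_slug):
--     return _NAV.get(current_slug, (None, None))
-- ===== Notes on version B (the rewrite author's own statement) =====
-- stated objective: alternative
-- what changed: B precomputes once, from MODULES, a dict mapping each module slug to its ((prev_label, prev.html), (next_label, next.html)) neighbor pair, so each call is a single table lookup with a (None, None) default, instead of A's per-call list rebuild, membership test, .index scan and two generator searches over MODULES.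
import Mathlib
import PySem

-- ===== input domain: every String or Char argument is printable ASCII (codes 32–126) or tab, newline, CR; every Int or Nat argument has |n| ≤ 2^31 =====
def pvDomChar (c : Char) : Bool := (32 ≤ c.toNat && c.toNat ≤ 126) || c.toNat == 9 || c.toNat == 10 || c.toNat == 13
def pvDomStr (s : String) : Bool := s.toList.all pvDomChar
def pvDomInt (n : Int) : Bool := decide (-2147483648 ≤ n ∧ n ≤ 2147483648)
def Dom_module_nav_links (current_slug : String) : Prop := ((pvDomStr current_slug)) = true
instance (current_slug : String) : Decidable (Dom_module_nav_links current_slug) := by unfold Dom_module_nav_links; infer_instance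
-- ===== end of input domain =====

-- B replaces A's per-call list rebuild + index + two generator scans by a nav table built
-- once from the module list and a single lookup with a (None, None) default (objective: alternative).

-- ===== PORT A =====
def pvModules : List (String × String × String) := [
  ("index", "Start here", "Overview"),
  ("module-01", "Why Claude for insurance marketing", "Module 1"),
  ("module-02", "Setting up Claude", "Module 2"),
  ("module-03", "The 10 prompt patterns", "Module 3"),
  ("module-04", "Prospecting emails", "Module 4"),
  ("module-05", "Social media content", "Module 5"),
  ("module-06", "Blog posts + SEO", "Module 6"),
  ("module-07", "Video scripts", "Module 7"),
  ("module-08", "Direct mail", "Module 8"),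
  ("module-09", "Referral requests", "Module 9"),
  ("module-10", "Review responses", "Module 10"),
  ("module-11", "Newsletter content", "Module 11"),
  ("module-12", "Facebook + Google ads", "Module 12"),
  ("module-13", "Client education material", "Module 13"),
  ("module-14", "The weekly marketing system", "Module 14"),
  ("module-15", "Compliance checklist", "Module 15"),
  ("prompt-library", "Prompt library", "Library")]

-- next((l for s, l, _ in MODULES if s == sl), None)
def pvFirstLabel (sl : String) : Option String :=
  (pvModules.find? (fun t => t.1 == sl)).map (fun t => t.2.1)

def module_nav_links (current_slug : String) : (Option (String × String)) × (Option (String × String)) :=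
  let slugs := (pvModules.filter (fun t => !(t.1 == "index" || t.1 == "prompt-library"))).map (fun t => t.1)
  if slugs.contains current_slug = false then (none, none)
  else
    match PySem.List.index? slugs current_slug with
    | none => (none, none)   -- unreachable: membership was checked above
    | some i =>
      -- slugs[i-1] / slugs[i+1]: indices valid under the guards; "" default unreachable
      let prev_slug : Option String := if i > 0 then some (PySem.List.pyGetD slugs ((i : Int) - 1) "") else none
      let next_slug : Option String := if i < slugs.length - 1 then some (PySem.List.pyGetD slugs ((i : Int) + 1) "") else none
      -- the generator always finds prev_slug/next_slug in MODULES, so the .getD "" default is unreachable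
      let prev := match prev_slug with
        | some ps => some ((pvFirstLabel ps).getD "", ps ++ ".html")
        | none => none
      let nxt := match next_slug with
        | some ns => some ((pvFirstLabel ns).getD "", ns ++ ".html")
        | none => none
      (prev, nxt)

-- ===== PORT B =====
def pvPairs : List (String × String) :=
  (pvModules.filter (fun t => !(t.1 == "index" || t.1 == "prompt-library"))).map (fun t => (t.1, t.2.1))

-- _fmt(pair) = (pair[1], pair[0] + ".html"); Option-lifted since pyGet? is total (indices valid under the guards)
def pvFmt (p : Option (String × String)) : Option (String × String) :=
  p.map (fun q => (q.2, q.1 ++ ".html"))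

def pvNav : PySem.Dict String ((Option (String × String)) × (Option (String × String))) :=
  (PySem.List.enumerate pvPairs).foldl
    (fun d e =>
      let prev := if e.1 > 0 then pvFmt (PySem.List.pyGet? pvPairs (e.1 - 1)) else none
      let nxt := if e.1 < (pvPairs.length : Int) - 1 then pvFmt (PySem.List.pyGet? pvPairs (e.1 + 1)) else none
      d.insert e.2.1 (prev, nxt))
    PySem.Dict.empty

def module_nav_links_alt (current_slug : String) : (Option (String × String)) × (Option (String × String)) :=
  pvNav.getD current_slug (none, none)

-- ===== PRECONDITION & SPEC =====
def Spec_module_nav_links (current_slug : String) (out : (Option (String × String)) × (Option (String × String))) : Prop := out = module_nav_links_alt current_slug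
instance (current_slug : String) (out : (Option (String × String)) × (Option (String × String))) : Decidable (Spec_module_nav_links current_slug out) := by unfold Spec_module_nav_links; infer_instance

-- ===== CLAIM (what is proved, stated in full; the proofs are below) =====
def Claim_equal_module_nav_links : Prop := ∀ (current_slug : String), Dom_module_nav_links current_slug → Spec_module_nav_links current_slug (module_nav_links current_slug)

-- ===== LEMMAS AND PROOFS =====
def pvSlugs : List String := ["module-01", "module-02", "module-03", "module-04", "module-05",
  "module-06", "module-07", "module-08", "module-09", "module-10", "module-11", "module-12",
  "module-13", "module-14", "module-15"]

theorem pv_out_of_table (s : String) (h : s ∉ pvSlugs) :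
    module_nav_links s = module_nav_links_alt s := by
  simp [pvSlugs, List.mem_cons] at h
  obtain ⟨h1, h2, h3, h4, h5, h6, h7, h8, h9, h10, h11, h12, h13, h14, h15⟩ := h
  have hA : module_nav_links s = (none, none) := by
    simp [module_nav_links, pvModules, h1, h2, h3, h4, h5, h6, h7, h8, h9, h10, h11, h12, h13, h14, h15]
  have hB : module_nav_links_alt s = (none, none) := by
    simp [module_nav_links_alt, pvNav, pvPairs, pvModules, PySem.List.enumerate,
      PySem.Dict.getD, PySem.Dict.get?, PySem.Dict.insert, PySem.Dict.empty,
      beq_iff_eq,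
      Ne.symm h1, Ne.symm h2, Ne.symm h3, Ne.symm h4, Ne.symm h5, Ne.symm h6, Ne.symm h7,
      Ne.symm h8, Ne.symm h9, Ne.symm h10, Ne.symm h11, Ne.symm h12, Ne.symm h13,
      Ne.symm h14, Ne.symm h15]
  rw [hA, hB]

-- ===== VERDICT (by name: the statement is the Claim_ definition above) =====
theorem module_nav_links_spec : Claim_equal_module_nav_links := by
  intro s _
  unfold Spec_module_nav_links
  by_cases h : s ∈ pvSlugs
  · fin_cases h <;> decide
  · exact pv_out_of_table s h
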